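-- pv_equiv track=rewrite | github.com/HoangNV2001/treeLSTM_rela_extraction | data_processing.py | _find_entity_index
-- ===== SOURCE A (Python) =====
-- def _find_entity_index(tokens, entity_text, char_start, sentence):
--     """Find entity index in tokenized sequence"""
--     entity_clean = entity_text.replace(' ', '_')
--
--     for i, token in enumerate(tokens):
--         if entity_clean == token or entity_text in token:
--             return i
--
--     # Fallback: find by position
--     char_count = 0
--     for i, token in enumerate(tokens):
--         if char_count >= char_start:
--             return i
--         char_count += len(token.replace('_', ' ')) + 1
--
--     return 0
-- ===== SOURCE B (Python) =====
-- from itertools import accumulate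
-- from bisect import bisect_left
--
--
-- def _find_entity_index(tokens, entity_text, char_start, sentence):
--     """Find entity index in tokenized sequence (prefix-offset + bisect fallback)."""
--     entity_clean = entity_text.replace(' ', '_')
--
--     matches = [i for i, token in enumerate(tokens)
--                if entity_clean == token or entity_text in token]
--     if matches:
--         return matches[0]
--
--     # Fallback: offsets[i] = cumulative char count before token i; the original
--     # loop returns the first i with offsets[i] >= char_start, which is a
--     # bisect_left on the sorted offsets list.
--     offsets = list(accumulate((len(t.replace('_', ' ')) + 1 for t in tokens),
--                               initial=0))[:-1]
--     j = bisect_left(offsets, char_start)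
--     return j if j < len(tokens) else 0
-- ===== Notes on version B (the rewrite author's own statement) =====
-- stated objective: alternative
-- what changed: The first-match search collects matching indices by a comprehension instead of an early-return loop, and the positional fallback replaces the running char-counter loop with a prefix-offset list built by itertools.accumulate searched with bisect.bisect_left.
import Mathlib
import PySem

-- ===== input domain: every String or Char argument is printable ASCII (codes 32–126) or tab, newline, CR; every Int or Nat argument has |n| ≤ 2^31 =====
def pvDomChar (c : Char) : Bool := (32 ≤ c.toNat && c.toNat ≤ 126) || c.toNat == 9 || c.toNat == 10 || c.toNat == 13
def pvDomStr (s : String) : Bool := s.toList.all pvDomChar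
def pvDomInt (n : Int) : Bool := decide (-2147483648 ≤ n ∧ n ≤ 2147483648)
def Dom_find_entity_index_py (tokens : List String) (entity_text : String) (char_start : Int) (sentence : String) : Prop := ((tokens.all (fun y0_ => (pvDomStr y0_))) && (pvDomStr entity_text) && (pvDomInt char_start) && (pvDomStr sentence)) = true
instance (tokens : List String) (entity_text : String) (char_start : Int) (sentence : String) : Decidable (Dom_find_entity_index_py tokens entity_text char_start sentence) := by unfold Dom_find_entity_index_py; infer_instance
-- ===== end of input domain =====

-- B replaces A's running-counter fallback loop by a prefix-offset list searched with
-- bisect_left, and collects first-loop matches by comprehension (objective: alternative).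
-- Neither version uses or mutates `sentence`; equivalence is about the return value.

-- ===== PORT A =====
-- first loop: `for i, token in enumerate(tokens): if entity_clean == token or entity_text in token: return i`
def pvA_match (tokens : List String) (clean text : String) (i : Int) : Option Int :=
  match tokens with
  | [] => none
  | t :: rest =>
      if clean == t || PySem.Str.isIn text t then some i
      else pvA_match rest clean text (i + 1)

-- fallback loop: running char_count, return i once char_count >= char_start, else 0
def pvA_fallback (tokens : List String) (char_start : Int) (i : Int) (cc : Int) : Int :=
  match tokens with
  | [] => 0
  | t :: rest =>
      if char_start ≤ cc then i
      else pvA_fallback rest char_start (i + 1)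
        (cc + PySem.Str.len (PySem.Str.replace t "_" " ") + 1)

def find_entity_index_py (tokens : List String) (entity_text : String) (char_start : Int) (sentence : String) : Int :=
  let entity_clean := PySem.Str.replace entity_text " " "_"
  match pvA_match tokens entity_clean entity_text 0 with
  | some i => i
  | none => pvA_fallback tokens char_start 0 0

-- ===== PORT B =====
-- itertools.accumulate(ws, initial=acc): [acc, acc+w0, acc+w0+w1, …]
def pvB_accum (ws : List Int) (acc : Int) : List Int :=
  match ws with
  | [] => [acc]
  | w :: rest => acc :: pvB_accum rest (acc + w)

def find_entity_index_py_alt (tokens : List String) (entity_text : String) (char_start : Int) (sentence : String) : Int :=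
  let entity_clean := PySem.Str.replace entity_text " " "_"
  let matchList := ((PySem.List.enumerate tokens).filter
      (fun p => entity_clean == p.2 || PySem.Str.isIn entity_text p.2)).map (·.1)
  match matchList with
  | m :: _ => m
  | [] =>
      -- offsets = list(accumulate((len(t.replace('_',' '))+1 for t in tokens), initial=0))[:-1]
      let offsets := (pvB_accum (tokens.map
          (fun t => PySem.Str.len (PySem.Str.replace t "_" " ") + 1)) 0).dropLast
      let j := PySem.List.bisectLeft offsets char_start
      if (j : Int) < (tokens.length : Int) then (j : Int) else 0

-- ===== PRECONDITION & SPEC =====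
def Spec_find_entity_index_py (tokens : List String) (entity_text : String) (char_start : Int) (sentence : String) (out : Int) : Prop := out = find_entity_index_py_alt tokens entity_text char_start sentence
instance (tokens : List String) (entity_text : String) (char_start : Int) (sentence : String) (out : Int) : Decidable (Spec_find_entity_index_py tokens entity_text char_start sentence out) := by unfold Spec_find_entity_index_py; infer_instance

-- ===== CLAIM (what is proved, stated in full; the proofs are below) =====
def Claim_equal_find_entity_index_py : Prop := ∀ (tokens : List String) (entity_text : String) (char_start : Int) (sentence : String), Dom_find_entity_index_py tokens entity_text char_start sentence → Spec_find_entity_index_py tokens entity_text char_start sentence (find_entity_index_py tokens entity_text char_start sentence)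

-- ===== LEMMAS AND PROOFS =====

-- A's first loop returns the head of B's comprehension list.
theorem pvA_match_eq (clean text : String) :
    ∀ (tokens : List String) (i : Int),
      pvA_match tokens clean text i =
        (((PySem.List.enumerate tokens i).filter
            (fun p => clean == p.2 || PySem.Str.isIn text p.2)).map (·.1)).head? := by
  intro tokens
  induction tokens with
  | nil => intro i; simp [pvA_match, PySem.List.enumerate_nil]
  | cons t rest ih =>
      intro i
      rw [PySem.List.enumerate_cons]
      by_cases h : clean = t ∨ PySem.Chars.isIn text.toList t.toList = true
      · simp [pvA_match, List.filter_cons, h]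
      · simp [pvA_match, h, ih]

-- A's fallback loop as a linear scan over the prefix-offset list.
def pvLin (offs : List Int) (cs : Int) (i : Int) : Int :=
  match offs with
  | [] => 0
  | o :: rest => if cs ≤ o then i else pvLin rest cs (i + 1)

theorem pvB_accum_ne_nil (ws : List Int) (acc : Int) : pvB_accum ws acc ≠ [] := by
  cases ws <;> simp [pvB_accum]

theorem pvA_fallback_eq (cs : Int) :
    ∀ (tokens : List String) (i cc : Int),
      pvA_fallback tokens cs i cc =
        pvLin ((pvB_accum (tokens.map
            (fun t => PySem.Str.len (PySem.Str.replace t "_" " ") + 1)) cc).dropLast)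
          cs i := by
  intro tokens
  induction tokens with
  | nil => intro i cc; simp [pvA_fallback, pvB_accum, pvLin]
  | cons t rest ih =>
      intro i cc
      have hne := pvB_accum_ne_nil (rest.map
          (fun t => PySem.Str.len (PySem.Str.replace t "_" " ") + 1))
          (cc + (PySem.Str.len (PySem.Str.replace t "_" " ") + 1))
      simp only [pvA_fallback, List.map_cons, pvB_accum]
      rw [List.dropLast_cons_of_ne_nil hne]
      simp only [pvLin]
      by_cases h : cs ≤ cc
      · simp [h]
      · simp only [h, if_false]
        rw [ih]
        ring_nf

-- pvLin as a findIdx? search.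
theorem pvLin_eq_findIdx? (cs : Int) :
    ∀ (offs : List Int) (i : Int),
      pvLin offs cs i =
        match offs.findIdx? (fun o => decide (cs ≤ o)) with
        | some k => i + (k : Int)
        | none => 0 := by
  intro offs
  induction offs with
  | nil => intro i; simp [pvLin]
  | cons o rest ih =>
      intro i
      simp only [pvLin, List.findIdx?_cons]
      by_cases h : cs ≤ o
      · simp [h]
      · simp only [h, decide_false, if_false]
        rw [ih]
        cases hf : rest.findIdx? (fun o => decide (cs ≤ o)) with
        | none => simp
        | some k =>
            simp only [Option.map_some]
            push_cast
            ring

-- first-index characterisation of findIdx? (no library lemma available in this form).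
theorem pv_findIdx?_some (p : Int → Bool) :
    ∀ (offs : List Int) (b : Nat), b < offs.length →
      p (offs.getD b 0) = true → (∀ j, j < b → p (offs.getD j 0) = false) →
      offs.findIdx? p = some b := by
  intro offs
  induction offs with
  | nil => intro b hb; simp at hb
  | cons o rest ih =>
      intro b hb hpb hlt
      rw [List.findIdx?_cons]
      cases b with
      | zero => simpa using hpb
      | succ b' =>
          have h0 : p o = false := by simpa using hlt 0 (Nat.succ_pos _)
          rw [h0, if_neg (by simp)]
          rw [ih b' (by simpa using hb) (by simpa using hpb)
            (fun j hj => by simpa using hlt (j + 1) (by omega))]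
          rfl

-- prefix offsets are sorted: every element of pvB_accum ws acc is ≥ acc (weights ≥ 0) …
theorem pvB_accum_le (ws : List Int) (hws : ∀ w ∈ ws, 0 ≤ w) (acc : Int) :
    ∀ x ∈ pvB_accum ws acc, acc ≤ x := by
  induction ws generalizing acc with
  | nil => simp [pvB_accum]
  | cons w rest ih =>
      intro x hx
      simp only [pvB_accum, List.mem_cons] at hx
      rcases hx with rfl | hx
      · exact le_refl _
      · have h0 : 0 ≤ w := hws w (List.mem_cons_self ..)
        have := ih (fun v hv => hws v (List.mem_cons_of_mem _ hv)) (acc + w) x hx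
        omega

-- … hence pvB_accum is Pairwise (≤), and so is its dropLast (a sublist).
theorem pvB_accum_pairwise (ws : List Int) (hws : ∀ w ∈ ws, 0 ≤ w) (acc : Int) :
    (pvB_accum ws acc).Pairwise (fun a b => a ≤ b) := by
  induction ws generalizing acc with
  | nil => simp [pvB_accum]
  | cons w rest ih =>
      simp only [pvB_accum, List.pairwise_cons]
      constructor
      · intro x hx
        have h0 : 0 ≤ w := hws w (List.mem_cons_self ..)
        have := pvB_accum_le rest (fun v hv => hws v (List.mem_cons_of_mem _ hv)) (acc + w) x hx
        omega
      · exact ih (fun v hv => hws v (List.mem_cons_of_mem _ hv)) (acc + w)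

theorem pv_len_nonneg (s : String) : 0 ≤ PySem.Str.len s := by
  simp [PySem.Str.len_eq]

-- the linear scan over a sorted list equals the bisect search (B's fallback);
-- n = offs.length is the tokens length in the application.
theorem pvLin_eq_bisect (offs : List Int) (hs : offs.Pairwise (fun a b => a ≤ b))
    (cs : Int) (n : Nat) (hn : offs.length = n) :
    pvLin offs cs 0 =
      (if ((PySem.List.bisectLeft offs cs : Nat) : Int) < (n : Int)
        then ((PySem.List.bisectLeft offs cs : Nat) : Int) else 0) := by
  obtain ⟨hble, hlt, hge⟩ := PySem.List.bisectLeft_spec offs cs hs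
  rw [pvLin_eq_findIdx? cs offs 0]
  by_cases hbn : PySem.List.bisectLeft offs cs < offs.length
  · have hfind : offs.findIdx? (fun o => decide (cs ≤ o)) = some (PySem.List.bisectLeft offs cs) := by
      apply pv_findIdx?_some
      · exact hbn
      · rw [List.getD_eq_getElem _ _ hbn]
        simpa using hge _ hbn (le_refl _)
      · intro j hj
        have hjl : j < offs.length := lt_trans hj hbn
        rw [List.getD_eq_getElem _ _ hjl]
        simpa using Int.not_le.mpr (hlt j hjl hj)
    rw [hfind]
    have hlt' : ((PySem.List.bisectLeft offs cs : Nat) : Int) < (n : Int) := by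
      omega
    simp only [hlt', if_true]
    simp
  · have hbl : PySem.List.bisectLeft offs cs = offs.length := le_antisymm hble (Nat.le_of_not_lt hbn)
    have hfind : offs.findIdx? (fun o => decide (cs ≤ o)) = none := by
      rw [List.findIdx?_eq_none_iff]
      intro o ho
      obtain ⟨j, hj, rfl⟩ := List.mem_iff_getElem.mp ho
      simpa using Int.not_le.mpr (hlt j hj (by omega))
    rw [hfind]
    have hnl : ¬ ((PySem.List.bisectLeft offs cs : Nat) : Int) < (n : Int) := by omega
    simp [hnl]

-- ===== VERDICT (by name: the statement is the Claim_ definition above) =====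
theorem find_entity_index_py_spec : Claim_equal_find_entity_index_py := by
  intro tokens entity_text char_start sentence _
  unfold Spec_find_entity_index_py find_entity_index_py find_entity_index_py_alt
  simp only []
  rw [pvA_match_eq]
  cases hm : (((PySem.List.enumerate tokens 0).filter
      (fun p => PySem.Str.replace entity_text " " "_" == p.2 ||
        PySem.Str.isIn entity_text p.2)).map (·.1)).head? with
  | some m =>
      obtain ⟨l, hl⟩ := List.head?_eq_some_iff.mp hm
      simp only [PySem.Str.isIn_eq] at hl
      simp [hl]
  | none =>
      rw [List.head?_eq_none_iff] at hm
      simp only [hm]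
      rw [pvA_fallback_eq]
      have hws : ∀ w ∈ tokens.map (fun t => PySem.Str.len (PySem.Str.replace t "_" " ") + 1), 0 ≤ w := by
        intro w hw
        obtain ⟨t, _, rfl⟩ := List.mem_map.mp hw
        have := pv_len_nonneg (PySem.Str.replace t "_" " ")
        omega
      have hpair : ((pvB_accum (tokens.map
          (fun t => PySem.Str.len (PySem.Str.replace t "_" " ") + 1)) 0).dropLast).Pairwise
          (fun a b => a ≤ b) :=
        (pvB_accum_pairwise _ hws 0).sublist (List.dropLast_sublist _)
      have haclen : ∀ (ws : List Int) (acc : Int), (pvB_accum ws acc).length = ws.length + 1 := by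
        intro ws
        induction ws with
        | nil => intro acc; simp [pvB_accum]
        | cons w rest ih => intro acc; simp [pvB_accum, ih]
      have hlen : ((pvB_accum (tokens.map
          (fun t => PySem.Str.len (PySem.Str.replace t "_" " ") + 1)) 0).dropLast).length
          = tokens.length := by
        simp [List.length_dropLast, haclen]
      exact pvLin_eq_bisect _ hpair char_start tokens.length hlen
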